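-- pv_equiv track=rewrite | github.com/ShajahanAI/codewars | python/7 kyu/106.py | clonewars
-- ===== SOURCE A (Python) =====
-- def clonewars(kata_per_day):
--     total_clones = 1
--     total_kata_solved = 0
--     for solutions_for_day in range(kata_per_day, 0, -1):
--         total_kata_solved += total_clones * solutions_for_day
--         total_clones *= 2 if solutions_for_day != 1 else 1
--
--     result = [total_clones, total_kata_solved]
--     return result
-- ===== SOURCE B (Python) =====
-- def clonewars(kata_per_day):
--     if kata_per_day <= 0:
--         return [1, 0]
--     return [2 ** (kata_per_day - 1), 2 ** (kata_per_day + 1) - kata_per_day - 2]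
-- ===== Notes on version B (the rewrite author's own statement) =====
-- stated objective: faster
-- what changed: Replaces the O(n) countdown loop accumulating clones and solved kata with the closed forms 2^(n-1) and 2^(n+1)-n-2 (and [1,0] for n<=0).
import Mathlib
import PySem

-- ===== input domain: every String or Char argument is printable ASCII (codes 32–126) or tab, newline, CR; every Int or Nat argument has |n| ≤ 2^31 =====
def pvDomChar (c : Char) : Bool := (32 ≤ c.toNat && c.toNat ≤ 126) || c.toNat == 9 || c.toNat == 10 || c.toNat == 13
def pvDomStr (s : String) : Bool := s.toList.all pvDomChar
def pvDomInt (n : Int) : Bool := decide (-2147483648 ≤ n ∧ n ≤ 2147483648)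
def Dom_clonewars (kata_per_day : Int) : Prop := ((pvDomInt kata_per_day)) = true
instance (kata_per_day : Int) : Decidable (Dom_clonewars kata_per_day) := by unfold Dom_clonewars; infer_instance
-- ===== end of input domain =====

-- B replaces A's O(n) countdown loop by the closed forms 2^(n-1) and 2^(n+1)-n-2 (O(1)).

-- ===== PORT A =====
-- literal port of A's loop: foldl over range(kata_per_day, 0, -1) carrying (total_clones, total_kata_solved)
def clonewars (kata_per_day : Int) : List Int :=
  let st := (PySem.List.pyRange kata_per_day 0 (-1)).foldl
    (fun (cs : Int × Int) solutions_for_day =>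
      (cs.1 * (if solutions_for_day ≠ 1 then 2 else 1), cs.2 + cs.1 * solutions_for_day))
    (1, 0)
  [st.1, st.2]

-- ===== PORT B =====
def clonewars_alt (kata_per_day : Int) : List Int :=
  if kata_per_day ≤ 0 then [1, 0]
  else [2 ^ (kata_per_day - 1).toNat, 2 ^ (kata_per_day + 1).toNat - kata_per_day - 2]

-- ===== PRECONDITION & SPEC =====
def Spec_clonewars (kata_per_day : Int) (out : List Int) : Prop := out = clonewars_alt kata_per_day
instance (kata_per_day : Int) (out : List Int) : Decidable (Spec_clonewars kata_per_day out) := by unfold Spec_clonewars; infer_instance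

-- ===== CLAIM (what is proved, stated in full; the proofs are below) =====
def Claim_equal_clonewars : Prop := ∀ (kata_per_day : Int), Dom_clonewars kata_per_day → Spec_clonewars kata_per_day (clonewars kata_per_day)

-- ===== LEMMAS AND PROOFS =====

-- loop invariant: folding A's body over range(m+1, 0, -1) from (c, s)
theorem clonewars_loop (m : Nat) : ∀ (c s : Int),
    (PySem.List.pyRange ((m : Int) + 1) 0 (-1)).foldl
      (fun (cs : Int × Int) d => (cs.1 * (if d ≠ 1 then 2 else 1), cs.2 + cs.1 * d)) (c, s)
    = (c * 2 ^ m, s + c * (2 ^ (m + 2) - ((m : Int) + 1) - 2)) := by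
  induction m with
  | zero =>
    intro c s
    rw [PySem.List.pyRange_neg_one_cons (by norm_num), PySem.List.pyRange_neg_one_eq_nil (by norm_num)]
    simp
  | succ k ih =>
    intro c s
    push_cast
    rw [show ((k : Int) + 1 + 1) = ((k : Int) + 1) + 1 by ring]
    rw [PySem.List.pyRange_neg_one_cons (by positivity)]
    simp only [List.foldl_cons]
    have h1 : ((k : Int) + 1 + 1) ≠ 1 := by omega
    rw [if_pos h1]
    rw [show ((k : Int) + 1 + 1 - 1) = ((k : Int) + 1) by ring]
    rw [ih]
    refine Prod.ext ?_ ?_ <;> simp <;> ring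

-- ===== VERDICT (by name: the statement is the Claim_ definition above) =====
theorem clonewars_spec : Claim_equal_clonewars := by
  intro n _
  unfold Spec_clonewars clonewars clonewars_alt
  by_cases h : n ≤ 0
  · rw [if_pos h, PySem.List.pyRange_neg_one_eq_nil h]
    simp
  · rw [if_neg h]
    push Not at h
    obtain ⟨m, hm⟩ : ∃ m : Nat, n = (m : Int) + 1 := ⟨(n - 1).toNat, by omega⟩
    subst hm
    simp only [clonewars_loop m 1 0]
    have h1 : ((m : Int) + 1 - 1).toNat = m := by omega
    have h2 : ((m : Int) + 1 + 1).toNat = m + 2 := by omega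
    rw [h1, h2]
    simp
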